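-- pv_equiv track=rewrite | github.com/kenta608/slackbot | src/plugins/suggest_sauna.py | delete_ng_element
-- ===== SOURCE A (Python) =====
-- from typing import List
--
-- def delete_ng_element(sauna_dict: dict, ng_list: List[str]) -> dict:
--     """
--     ngワードに指定されたワードを含む辞書を削除するß
--     スポーツジム系のサウナを消したい
--     """
--     ng_keys = []
--     for key in sauna_dict.keys():
--         for ng_word in ng_list:
--             if ng_word in key:
--                 ng_keys.append(key)
--     new_sauna_dict = {k: v for k, v in sauna_dict.items() if k not in ng_keys}
--     return new_sauna_dict
-- ===== SOURCE B (Python) =====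
-- def delete_ng_element(sauna_dict: dict, ng_list):
--     """Single-pass: keep each entry whose key contains no ng word."""
--     return {k: v for k, v in sauna_dict.items()
--             if not any(ng in k for ng in ng_list)}
-- ===== Notes on version B (the rewrite author's own statement) =====
-- stated objective: faster
-- what changed: Replaces the two-phase build of an ng_keys list (nested loops) followed by a dict comprehension with an O(K^2) list-membership test by a single comprehension that tests substring containment inline per key.
import Mathlib
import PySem

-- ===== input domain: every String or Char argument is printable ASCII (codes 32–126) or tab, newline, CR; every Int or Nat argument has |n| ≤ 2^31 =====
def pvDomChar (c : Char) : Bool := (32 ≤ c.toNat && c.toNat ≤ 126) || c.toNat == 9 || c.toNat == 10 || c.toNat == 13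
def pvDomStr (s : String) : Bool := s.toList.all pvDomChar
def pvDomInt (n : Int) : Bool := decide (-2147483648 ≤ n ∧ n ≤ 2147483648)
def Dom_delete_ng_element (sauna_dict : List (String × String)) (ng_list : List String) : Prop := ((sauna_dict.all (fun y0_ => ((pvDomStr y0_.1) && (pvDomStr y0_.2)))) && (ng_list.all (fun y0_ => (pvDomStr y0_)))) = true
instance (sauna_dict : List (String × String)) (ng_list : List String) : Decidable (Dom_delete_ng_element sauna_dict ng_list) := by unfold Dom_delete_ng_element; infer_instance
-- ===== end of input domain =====

-- B replaces A's two-phase build of an ng_keys list plus membership filter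
-- by a single filter testing substring containment inline (simpler).


-- ===== PORT A =====
def delete_ng_element (sauna_dict : List (String × String)) (ng_list : List String) : List (String × String) :=
  let ng_keys : List String :=
    sauna_dict.foldl (fun acc kv =>
      ng_list.foldl (fun acc2 ng_word =>
        if PySem.Str.isIn ng_word kv.1 then acc2 ++ [kv.1] else acc2) acc) []
  sauna_dict.filter (fun kv => !(ng_keys.contains kv.1))

-- ===== PORT B =====
def delete_ng_element_alt (sauna_dict : List (String × String)) (ng_list : List String) : List (String × String) :=
  sauna_dict.filter (fun kv => !(ng_list.any (fun ng => PySem.Str.isIn ng kv.1)))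

-- ===== PRECONDITION & SPEC =====
def Spec_delete_ng_element (sauna_dict : List (String × String)) (ng_list : List String) (out : List (String × String)) : Prop := out = delete_ng_element_alt sauna_dict ng_list
instance (sauna_dict : List (String × String)) (ng_list : List String) (out : List (String × String)) : Decidable (Spec_delete_ng_element sauna_dict ng_list out) := by unfold Spec_delete_ng_element; infer_instance

-- ===== CLAIM (what is proved, stated in full; the proofs are below) =====
def Claim_equal_delete_ng_element : Prop := ∀ (sauna_dict : List (String × String)) (ng_list : List String), Dom_delete_ng_element sauna_dict ng_list → Spec_delete_ng_element sauna_dict ng_list (delete_ng_element sauna_dict ng_list)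

-- ===== LEMMAS AND PROOFS =====

-- A's ng_keys list is the flatMap of per-entry matched-ng-word copies of the key.
theorem ng_keys_eq (sauna_dict : List (String × String)) (ng_list : List String) :
    sauna_dict.foldl (fun acc kv =>
      ng_list.foldl (fun acc2 ng_word =>
        if PySem.Str.isIn ng_word kv.1 then acc2 ++ [kv.1] else acc2) acc) ([] : List String)
    = sauna_dict.flatMap (fun kv =>
        (ng_list.filter (fun ng => PySem.Str.isIn ng kv.1)).map (fun _ => kv.1)) := by
  have h : ∀ acc kv, kv ∈ sauna_dict →
      ng_list.foldl (fun acc2 ng_word =>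
        if PySem.Str.isIn ng_word kv.1 then acc2 ++ [kv.1] else acc2) acc
      = acc ++ (ng_list.filter (fun ng => PySem.Str.isIn ng kv.1)).map (fun _ => kv.1) := by
    intro acc kv _
    exact PySem.List.foldl_append_if (fun ng => PySem.Str.isIn ng kv.1) (fun _ => kv.1) ng_list acc
  rw [PySem.List.foldl_congr_mem (g := fun acc kv =>
        acc ++ (ng_list.filter (fun ng => PySem.Str.isIn ng kv.1)).map (fun _ => kv.1))]
  · exact PySem.List.foldl_append_eq_flatMap _ _ _
  · intro acc kv hm; exact h acc kv hm

theorem delete_ng_element_spec : Claim_equal_delete_ng_element := by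
  intro sauna_dict ng_list _
  unfold Spec_delete_ng_element delete_ng_element delete_ng_element_alt
  rw [ng_keys_eq]
  apply List.filter_congr
  intro kv hmem
  congr 1
  rw [Bool.eq_iff_iff]
  simp only [List.contains_eq_mem, decide_eq_true_eq, List.any_eq_true, List.mem_flatMap,
    List.mem_map, List.mem_filter]
  constructor
  · rintro ⟨kv', _, ng, ⟨hng, hin⟩, hk⟩
    exact ⟨ng, hng, hk ▸ hin⟩
  · rintro ⟨ng, hng, hin⟩
    exact ⟨kv, hmem, ng, ⟨hng, hin⟩, rfl⟩
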